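-- pv_equiv track=rewrite | github.com/silkyrich/uk-curriculum-as-graph | layers/uk-curriculum/scripts/generate_concept_clusters.py | build_co_teach_groups
-- ===== SOURCE A (Python) =====
-- from collections import defaultdict, deque
--
-- def build_co_teach_groups(concept_ids, co_teach_edges, max_group_size=4):
--     """Union-Find to merge co-teaching pairs into groups.
--
--     Groups are capped at max_group_size to prevent runaway merging
--     from aggressive vocabulary-overlap heuristics. If a union would
--     create a group larger than the cap, the edge is silently skipped.
--     Teachers can always merge clusters manually.
--     """
--     parent = {cid: cid for cid in concept_ids}
--     size = {cid: 1 for cid in concept_ids}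
--
--     def find(x):
--         while parent[x] != x:
--             parent[x] = parent[parent[x]]
--             x = parent[x]
--         return x
--
--     def union(a, b):
--         ra, rb = find(a), find(b)
--         if ra != rb:
--             # Cap: don't merge if combined size exceeds limit
--             if size[ra] + size[rb] > max_group_size:
--                 return
--             # Union by size
--             if size[ra] < size[rb]:
--                 ra, rb = rb, ra
--             parent[rb] = ra
--             size[ra] += size[rb]
--
--     for src, tgt in co_teach_edges:
--         if src in parent and tgt in parent:
--             union(src, tgt)
--
--     groups = defaultdict(set)
--     for cid in concept_ids:
--         groups[find(cid)].add(cid)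
--     return list(groups.values())
-- ===== SOURCE B (Python) =====
-- def build_co_teach_groups(concept_ids, co_teach_edges, max_group_size=4):
--     """Explicit grouping instead of a union-find forest: group_of maps each
--     concept to its group label, members maps a label to the list of its
--     concepts; an edge merges the smaller group into the larger by relabelling,
--     unless the combined size would exceed max_group_size."""
--     group_of = {}
--     members = {}
--     for cid in concept_ids:
--         if cid not in group_of:
--             group_of[cid] = cid
--             members[cid] = [cid]
--     for src, tgt in co_teach_edges:
--         ga = group_of.get(src)
--         gb = group_of.get(tgt)
--         if ga is None or gb is None or ga == gb:
--             continue
--         ma = members[ga]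
--         mb = members[gb]
--         if len(ma) + len(mb) > max_group_size:
--             continue
--         if len(ma) < len(mb):
--             ga, gb, ma, mb = gb, ga, mb, ma
--         for c in mb:
--             group_of[c] = ga
--         members[ga] = ma + mb
--         del members[gb]
--     out = {}
--     for cid in concept_ids:
--         out.setdefault(group_of[cid], set()).add(cid)
--     return list(out.values())
-- ===== Notes on version B (the rewrite author's own statement) =====
-- stated objective: alternative
-- what changed: Replaces the union-find forest (parent pointers with path halving and union by size) by an explicit grouping: a group-label map plus per-group member lists, merging the smaller group into the larger by relabelling its members, and emitting groups by first occurrence.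
import Mathlib
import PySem

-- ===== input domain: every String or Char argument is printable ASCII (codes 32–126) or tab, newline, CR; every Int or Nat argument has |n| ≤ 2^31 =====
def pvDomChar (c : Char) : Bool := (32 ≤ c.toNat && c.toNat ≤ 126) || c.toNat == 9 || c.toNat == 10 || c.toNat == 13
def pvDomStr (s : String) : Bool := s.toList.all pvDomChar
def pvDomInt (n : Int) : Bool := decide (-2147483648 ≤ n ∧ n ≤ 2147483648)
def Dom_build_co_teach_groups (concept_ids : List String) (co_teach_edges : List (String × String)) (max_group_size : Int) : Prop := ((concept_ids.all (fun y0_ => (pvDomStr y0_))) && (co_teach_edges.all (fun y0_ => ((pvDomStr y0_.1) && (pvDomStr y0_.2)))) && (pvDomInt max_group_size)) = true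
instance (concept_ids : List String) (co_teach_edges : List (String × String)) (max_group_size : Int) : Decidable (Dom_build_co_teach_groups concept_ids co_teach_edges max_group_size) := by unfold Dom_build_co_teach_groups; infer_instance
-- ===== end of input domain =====

-- B replaces A's union-find forest (parent pointers, path halving, union by size) by an
-- explicit grouping that relabels the smaller group's members into the larger; same values.

-- ===== PORT A =====
-- while parent[x] != x: parent[x] = parent[parent[x]]; x = parent[x]
-- (fuel makes the loop total; on every state A reaches, parent is a forest whose paths are
-- shorter than the number of keys, so the fuel `parent.size` is never exhausted; the getD
-- defaults are exact because `find` is only called on dict keys, where Python's parent[x]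
-- cannot raise)
def pvFind (fuel : Nat) (parent : PySem.Dict String String) (x : String) :
    String × PySem.Dict String String :=
  match fuel with
  | 0 => (x, parent)
  | Nat.succ f =>
    let px := parent.getD x x
    if px = x then (x, parent)
    else
      let ppx := parent.getD px px
      pvFind f (parent.insert x ppx) ppx

def pvUnion (parent : PySem.Dict String String) (size : PySem.Dict String Int)
    (a b : String) (maxg : Int) : PySem.Dict String String × PySem.Dict String Int :=
  let r1 := pvFind parent.size parent a
  let r2 := pvFind r1.2.size r1.2 b
  let ra := r1.1
  let rb := r2.1
  let parent := r2.2
  if ra ≠ rb then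
    if size.getD ra 0 + size.getD rb 0 > maxg then (parent, size)
    else
      let p := if size.getD ra 0 < size.getD rb 0 then (rb, ra) else (ra, rb)
      (parent.insert p.2 p.1, size.insert p.1 (size.getD p.1 0 + size.getD p.2 0))
  else (parent, size)

def build_co_teach_groups (concept_ids : List String) (co_teach_edges : List (String × String)) (max_group_size : Int) : List (List String) :=
  let parent : PySem.Dict String String :=
    concept_ids.foldl (fun d c => d.insert c c) PySem.Dict.empty
  let size : PySem.Dict String Int :=
    concept_ids.foldl (fun d c => d.insert c 1) PySem.Dict.empty
  let st := co_teach_edges.foldl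
    (fun (st : PySem.Dict String String × PySem.Dict String Int) e =>
      if st.1.contains e.1 && st.1.contains e.2 then pvUnion st.1 st.2 e.1 e.2 max_group_size
      else st) (parent, size)
  let fin := concept_ids.foldl
    (fun (st : PySem.Dict String (PySem.Set String) × PySem.Dict String String) c =>
      let r := pvFind st.2.size st.2 c
      (st.1.insert r.1 (PySem.Set.add (st.1.getD r.1 PySem.Set.empty) c), r.2))
    (PySem.Dict.empty, st.1)
  fin.1.values

-- ===== PORT B =====
-- for c in mb: group_of[c] = ga
def pvRelabel (gof : PySem.Dict String String) (l : List String) (g : String) :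
    PySem.Dict String String :=
  l.foldl (fun m c => m.insert c g) gof

def build_co_teach_groups_alt (concept_ids : List String) (co_teach_edges : List (String × String)) (max_group_size : Int) : List (List String) :=
  let st0 : PySem.Dict String String × PySem.Dict String (List String) :=
    concept_ids.foldl
      (fun st c => if st.1.contains c then st else (st.1.insert c c, st.2.insert c [c]))
      (PySem.Dict.empty, PySem.Dict.empty)
  let st := co_teach_edges.foldl
    (fun (st : PySem.Dict String String × PySem.Dict String (List String)) e =>
      match st.1.get? e.1, st.1.get? e.2 with
      | some ga, some gb =>
        if ga = gb then st
        else
          let ma := st.2.getD ga []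
          let mb := st.2.getD gb []
          if (ma.length : Int) + (mb.length : Int) > max_group_size then st
          else
            let q := if ma.length < mb.length then (gb, ga, mb, ma) else (ga, gb, ma, mb)
            (pvRelabel st.1 q.2.2.2 q.1, (st.2.insert q.1 (q.2.2.1 ++ q.2.2.2)).erase q.2.1)
      | _, _ => st) st0
  -- out.setdefault(group_of[cid], set()).add(cid)  (group_of[cid] never raises: every cid is a key)
  let out := concept_ids.foldl
    (fun (g : PySem.Dict String (PySem.Set String)) c =>
      let k := st.1.getD c c
      g.insert k (PySem.Set.add (g.getD k PySem.Set.empty) c))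
    PySem.Dict.empty
  out.values

-- ===== PRECONDITION & SPEC =====
def Spec_build_co_teach_groups (concept_ids : List String) (co_teach_edges : List (String × String)) (max_group_size : Int) (out : List (List String)) : Prop := out = build_co_teach_groups_alt concept_ids co_teach_edges max_group_size
instance (concept_ids : List String) (co_teach_edges : List (String × String)) (max_group_size : Int) (out : List (List String)) : Decidable (Spec_build_co_teach_groups concept_ids co_teach_edges max_group_size out) := by unfold Spec_build_co_teach_groups; infer_instance

-- ===== CLAIM (what is proved, stated in full; the proofs are below) =====
def Claim_equal_build_co_teach_groups : Prop := ∀ (concept_ids : List String) (co_teach_edges : List (String × String)) (max_group_size : Int), Dom_build_co_teach_groups concept_ids co_teach_edges max_group_size → Spec_build_co_teach_groups concept_ids co_teach_edges max_group_size (build_co_teach_groups concept_ids co_teach_edges max_group_size)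

-- ===== LEMMAS AND PROOFS =====

-- ---------- parent-forest machinery for A's union-find ----------

/-- one parent step (Python's `parent[x]`, with `x` itself for a missing key). -/
def pvPf (d : PySem.Dict String String) (x : String) : String := d.getD x x

/-- `n` parent steps. -/
def pvIt (d : PySem.Dict String String) : Nat → String → String
  | 0, x => x
  | n + 1, x => pvIt d n (pvPf d x)

/-- `x` is a root (fixpoint of the parent map). -/
def pvRootP (d : PySem.Dict String String) (x : String) : Prop := pvPf d x = x

/-- well-formed forest: values are keys, and every chain reaches a root. -/
def pvWF (d : PySem.Dict String String) : Prop :=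
  (∀ k v, d.get? k = some v → d.contains v = true) ∧
  (∀ x, ∃ n, pvRootP d (pvIt d n x))

/-- the root of `x` (enough steps: paths are shorter than the number of keys). -/
def pvRoot (d : PySem.Dict String String) (x : String) : String := pvIt d d.size x

theorem pvIt_succ_out (d : PySem.Dict String String) (n : Nat) (x : String) :
    pvIt d (n + 1) x = pvPf d (pvIt d n x) := by
  induction n generalizing x with
  | zero => rfl
  | succ n ih => simpa [pvIt] using ih (pvPf d x)

theorem pvIt_add (d : PySem.Dict String String) (m n : Nat) (x : String) :
    pvIt d (m + n) x = pvIt d n (pvIt d m x) := by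
  induction n with
  | zero => rfl
  | succ n ih => rw [show m + (n + 1) = (m + n) + 1 from rfl, pvIt_succ_out, ih, pvIt_succ_out]

theorem pvIt_absorb {d : PySem.Dict String String} {n : Nat} {x : String}
    (h : pvRootP d (pvIt d n x)) {m : Nat} (hnm : n ≤ m) :
    pvIt d m x = pvIt d n x := by
  obtain ⟨k, rfl⟩ := Nat.exists_eq_add_of_le hnm
  induction k with
  | zero => rfl
  | succ k ih =>
    rw [show n + (k + 1) = (n + k) + 1 from rfl, pvIt_succ_out, ih (Nat.le_add_right n k), h]

theorem pv_contains_of_not_rootP {d : PySem.Dict String String} {x : String}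
    (h : ¬ pvRootP d x) : d.contains x = true := by
  by_contra hc
  exact h (PySem.Dict.getD_of_not_contains d x (by simpa using hc))

theorem pv_contains_pvPf {d : PySem.Dict String String}
    (hcl : ∀ k v, d.get? k = some v → d.contains v = true) {x : String}
    (h : d.contains x = true) : d.contains (pvPf d x) = true := by
  have := PySem.Dict.contains_eq_isSome_get? d x
  rcases hg : d.get? x with _ | v
  · rw [hg] at this; rw [h] at this; simp at this
  · have : pvPf d x = v := by
      simp [pvPf, PySem.Dict.getD_eq_get?_getD, hg]
    rw [this]; exact hcl x v hg

theorem pv_contains_pvIt {d : PySem.Dict String String}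
    (hcl : ∀ k v, d.get? k = some v → d.contains v = true) {x : String}
    (h : d.contains x = true) (n : Nat) : d.contains (pvIt d n x) = true := by
  induction n generalizing x with
  | zero => exact h
  | succ n ih => exact ih (pv_contains_pvPf hcl h)

theorem pv_keys_length (d : PySem.Dict String String) : d.keys.length = d.size := by
  simp [PySem.Dict.keys, PySem.Dict.size]

/-- pigeonhole: a well-formed forest reaches its root within `d.size` steps. -/
theorem pv_bound {d : PySem.Dict String String} (h : pvWF d) (x : String) :
    pvRootP d (pvIt d d.size x) := by
  by_contra hroot
  have hnonroot : ∀ i, i ≤ d.size → ¬ pvRootP d (pvIt d i x) := by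
    intro i hi hri
    exact hroot ((pvIt_absorb hri hi).symm ▸ hri)
  have hinj : ∀ i j, i < j → j ≤ d.size → pvIt d i x ≠ pvIt d j x := by
    intro i j hij hj heq
    obtain ⟨n, hn⟩ := h.2 x
    have hper : ∀ k, pvIt d (i + k * (j - i)) x = pvIt d i x := by
      intro k
      induction k with
      | zero => simp
      | succ k ihk =>
        have h1 : i + (k + 1) * (j - i) = (i + k * (j - i)) + (j - i) := by ring
        rw [h1, pvIt_add, ihk, ← pvIt_add,
          show i + (j - i) = j from by omega, ← heq]
    have hk : n ≤ i + n * (j - i) := by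
      have : 1 ≤ j - i := by omega
      calc n ≤ n * (j - i) := Nat.le_mul_of_pos_right n (by omega)
        _ ≤ i + n * (j - i) := by omega
    have := pvIt_absorb hn hk
    rw [hper n] at this
    exact hnonroot i (by omega) (this ▸ hn)
  have hmem : ∀ i : Fin (d.size + 1), pvIt d i.1 x ∈ d.keys := by
    intro i
    have hc := pv_contains_of_not_rootP (hnonroot i.1 (by omega))
    exact (PySem.Dict.contains_iff_mem_keys d _).mp hc
  have hfinj : Function.Injective (fun i : Fin (d.size + 1) => pvIt d i.1 x) := by
    intro i j hij
    by_contra hne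
    rcases Nat.lt_or_ge i.1 j.1 with hlt | hge
    · exact hinj i.1 j.1 hlt (by omega) hij
    · have hlt : j.1 < i.1 := by
        rcases Nat.lt_or_ge j.1 i.1 with h' | h'
        · exact h'
        · exact absurd (Fin.ext (by omega)) hne
      exact hinj j.1 i.1 hlt (by omega) hij.symm
  have hcard : d.size + 1 ≤ d.size := by
    calc d.size + 1 = Fintype.card (Fin (d.size + 1)) := by simp
      _ = (Finset.univ.image (fun i : Fin (d.size + 1) => pvIt d i.1 x)).card :=
          (Finset.card_image_of_injective _ hfinj).symm
      _ ≤ d.keys.toFinset.card := by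
          apply Finset.card_le_card
          intro y hy
          simp only [Finset.mem_image] at hy
          obtain ⟨i, _, rfl⟩ := hy
          exact List.mem_toFinset.mpr (hmem i)
      _ ≤ d.keys.length := d.keys.toFinset_card_le
      _ = d.size := pv_keys_length d
  omega

theorem pvRoot_char {d : PySem.Dict String String} (h : pvWF d) {n : Nat} {x : String}
    (hr : pvRootP d (pvIt d n x)) : pvRoot d x = pvIt d n x := by
  rcases Nat.le_total n d.size with hle | hle
  · exact pvIt_absorb hr hle
  · exact (pvIt_absorb (pv_bound h x) hle).symm ▸ rfl

theorem pvRootP_pvRoot {d : PySem.Dict String String} (h : pvWF d) (x : String) :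
    pvRootP d (pvRoot d x) := pv_bound h x

theorem pvRoot_of_rootP {d : PySem.Dict String String} (h : pvWF d) {x : String}
    (hx : pvRootP d x) : pvRoot d x = x := pvRoot_char h (n := 0) hx

theorem pvRoot_pf {d : PySem.Dict String String} (h : pvWF d) (x : String) :
    pvRoot d (pvPf d x) = pvRoot d x := by
  have h1 : pvIt d (1 + d.size) x = pvIt d d.size (pvPf d x) := by
    rw [pvIt_add]; rfl
  have h2 : pvIt d (1 + d.size) x = pvIt d d.size x :=
    pvIt_absorb (pv_bound h x) (by omega)
  calc pvRoot d (pvPf d x) = pvIt d d.size (pvPf d x) := rfl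
    _ = pvIt d (1 + d.size) x := h1.symm
    _ = pvIt d d.size x := h2
    _ = pvRoot d x := rfl

theorem pv_contains_insert_eq {d : PySem.Dict String String} {k : String}
    (hk : d.contains k = true) (v y : String) :
    (d.insert k v).contains y = d.contains y := by
  rw [PySem.Dict.contains_insert]
  by_cases hy : y = k
  · subst hy; simp [hk]
  · simp [hy]

theorem pv_size_insert_of_contains {d : PySem.Dict String String} {k : String}
    (hk : d.contains k = true) (v : String) : (d.insert k v).size = d.size := by
  rw [PySem.Dict.size_insert]; simp [hk]

-- ---------- path halving preserves the forest and its roots ----------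

theorem pv_rootP_insert_ne {d : PySem.Dict String String} {r k : String}
    (hr : pvRootP d r) (hne : r ≠ k) (w : String) : pvRootP (d.insert k w) r := by
  show (d.insert k w).getD r r = r
  rw [PySem.Dict.getD_insert, if_neg hne]
  exact hr

theorem pvIt_two (d : PySem.Dict String String) (x : String) :
    pvIt d 2 x = pvPf d (pvPf d x) := rfl

theorem pv_halve_it {d : PySem.Dict String String} {x : String} (_hx : ¬ pvRootP d x) :
    ∀ n y, pvRootP d (pvIt d n y) →
      pvIt (d.insert x (pvPf d (pvPf d x))) n y = pvIt d n y := by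
  intro n
  induction n with
  | zero => intro y _; rfl
  | succ n ih =>
    intro y hy
    by_cases hyx : y = x
    · rw [hyx] at hy ⊢
      have hpf : pvPf (d.insert x (pvPf d (pvPf d x))) x = pvPf d (pvPf d x) := by
        show (d.insert x (pvPf d (pvPf d x))).getD x x = _
        rw [PySem.Dict.getD_insert, if_pos rfl]
      have h2 : pvIt d (n + 2) x = pvIt d n (pvPf d (pvPf d x)) := by
        rw [show n + 2 = 2 + n from by omega, pvIt_add, pvIt_two]
      have habs : pvIt d (n + 2) x = pvIt d (n + 1) x :=
        pvIt_absorb hy (Nat.le_succ _)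
      have hroot2 : pvRootP d (pvIt d n (pvPf d (pvPf d x))) := by
        rw [← h2, habs]; exact hy
      calc pvIt (d.insert x (pvPf d (pvPf d x))) (n + 1) x
          = pvIt (d.insert x (pvPf d (pvPf d x))) n
              (pvPf (d.insert x (pvPf d (pvPf d x))) x) := rfl
        _ = pvIt (d.insert x (pvPf d (pvPf d x))) n (pvPf d (pvPf d x)) := by rw [hpf]
        _ = pvIt d n (pvPf d (pvPf d x)) := ih _ hroot2
        _ = pvIt d (n + 2) x := h2.symm
        _ = pvIt d (n + 1) x := habs
    · have hpf : pvPf (d.insert x (pvPf d (pvPf d x))) y = pvPf d y := by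
        show (d.insert x (pvPf d (pvPf d x))).getD y y = pvPf d y
        rw [PySem.Dict.getD_insert, if_neg hyx]
        rfl
      show pvIt (d.insert x (pvPf d (pvPf d x))) n
          (pvPf (d.insert x (pvPf d (pvPf d x))) y) = pvIt d (n + 1) y
      rw [hpf]
      exact ih _ hy

theorem pv_halve {d : PySem.Dict String String} (h : pvWF d) {x : String}
    (hx : ¬ pvRootP d x) :
    pvWF (d.insert x (pvPf d (pvPf d x))) ∧
    (d.insert x (pvPf d (pvPf d x))).size = d.size ∧
    (∀ y, (d.insert x (pvPf d (pvPf d x))).contains y = d.contains y) ∧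
    (∀ y, pvRoot (d.insert x (pvPf d (pvPf d x))) y = pvRoot d y) := by
  have hcx : d.contains x = true := pv_contains_of_not_rootP hx
  have hcont : ∀ y, (d.insert x (pvPf d (pvPf d x))).contains y = d.contains y :=
    pv_contains_insert_eq hcx _
  have hsz : (d.insert x (pvPf d (pvPf d x))).size = d.size :=
    pv_size_insert_of_contains hcx _
  have hrootne : ∀ r, pvRootP d r → r ≠ x := by
    rintro r hr rfl; exact hx hr
  have hwf' : pvWF (d.insert x (pvPf d (pvPf d x))) := by
    constructor
    · intro k v hget
      rw [PySem.Dict.get?_insert] at hget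
      rw [hcont]
      split_ifs at hget with hk
      · cases hget
        exact pv_contains_pvPf h.1 (pv_contains_pvPf h.1 hcx)
      · exact h.1 k v hget
    · intro y
      obtain ⟨n, hn⟩ := h.2 y
      refine ⟨n, ?_⟩
      rw [pv_halve_it hx n y hn]
      exact pv_rootP_insert_ne hn (hrootne _ hn) _
  refine ⟨hwf', hsz, hcont, fun y => ?_⟩
  have hb := pv_bound h y
  have h1 : pvIt (d.insert x (pvPf d (pvPf d x))) d.size y = pvIt d d.size y :=
    pv_halve_it hx _ y hb
  have h2 : pvRootP (d.insert x (pvPf d (pvPf d x)))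
      (pvIt (d.insert x (pvPf d (pvPf d x))) d.size y) := by
    rw [h1]; exact pv_rootP_insert_ne hb (hrootne _ hb) _
  rw [pvRoot_char hwf' h2, h1]
  rfl

-- ---------- specification of pvFind ----------

theorem pvFind_spec : ∀ (fuel : Nat) (d : PySem.Dict String String) (x : String),
    pvWF d → pvRootP d (pvIt d fuel x) →
    (pvFind fuel d x).1 = pvRoot d x ∧
    pvWF (pvFind fuel d x).2 ∧
    (pvFind fuel d x).2.size = d.size ∧
    (∀ y, (pvFind fuel d x).2.contains y = d.contains y) ∧
    (∀ y, pvRoot (pvFind fuel d x).2 y = pvRoot d y) := by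
  intro fuel
  induction fuel with
  | zero =>
    intro d x hwf hr
    exact ⟨(pvRoot_of_rootP hwf hr).symm, hwf, rfl, fun _ => rfl, fun _ => rfl⟩
  | succ f ih =>
    intro d x hwf hr
    by_cases hpx : d.getD x x = x
    · have heq : pvFind (f + 1) d x = (x, d) := by
        simp [pvFind, hpx]
      rw [heq]
      exact ⟨(pvRoot_of_rootP hwf hpx).symm, hwf, rfl, fun _ => rfl, fun _ => rfl⟩
    · have heq : pvFind (f + 1) d x
          = pvFind f (d.insert x (pvPf d (pvPf d x))) (pvPf d (pvPf d x)) := by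
        simp [pvFind, hpx, pvPf]
      have hx : ¬ pvRootP d x := hpx
      obtain ⟨hwf', hsz', hcont', hroot'⟩ := pv_halve hwf hx
      have h2 : pvIt d f (pvPf d (pvPf d x)) = pvIt d (2 + f) x := by
        rw [pvIt_add, pvIt_two]
      have habs : pvIt d (2 + f) x = pvIt d (f + 1) x :=
        pvIt_absorb hr (by omega)
      have hroots : pvRootP d (pvIt d f (pvPf d (pvPf d x))) := by
        rw [h2, habs]; exact hr
      have hrne : pvIt d f (pvPf d (pvPf d x)) ≠ x := by
        intro hE; exact hx (hE ▸ hroots)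
      have hr' : pvRootP (d.insert x (pvPf d (pvPf d x)))
          (pvIt (d.insert x (pvPf d (pvPf d x))) f (pvPf d (pvPf d x))) := by
        rw [pv_halve_it hx f _ hroots]
        exact pv_rootP_insert_ne hroots hrne _
      obtain ⟨ih1, ih2, ih3, ih4, ih5⟩ := ih _ _ hwf' hr'
      rw [heq]
      refine ⟨?_, ih2, by rw [ih3, hsz'], fun y => by rw [ih4 y, hcont' y],
        fun y => by rw [ih5 y, hroot' y]⟩
      rw [ih1, hroot', pvRoot_pf hwf, pvRoot_pf hwf]

-- ---------- linking two roots ----------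

theorem pv_link {d : PySem.Dict String String} (h : pvWF d) {ra rb : String}
    (hra : pvRootP d ra) (hrb : pvRootP d rb) (hcb : d.contains rb = true)
    (hcra : d.contains ra = true) (hne : ra ≠ rb) :
    pvWF (d.insert rb ra) ∧
    (d.insert rb ra).size = d.size ∧
    (∀ y, (d.insert rb ra).contains y = d.contains y) ∧
    (∀ y, pvRoot (d.insert rb ra) y = if pvRoot d y = rb then ra else pvRoot d y) := by
  have hrootP_ra : pvRootP (d.insert rb ra) ra := pv_rootP_insert_ne hra hne _
  have hpf' : ∀ y, pvPf (d.insert rb ra) y = if y = rb then ra else pvPf d y := by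
    intro y
    show (d.insert rb ra).getD y y = _
    rw [PySem.Dict.getD_insert]
    rfl
  have reach1 : ∀ n y, pvIt d n y = rb → pvIt (d.insert rb ra) (n + 1) y = ra := by
    intro n
    induction n with
    | zero =>
      intro y hy
      have hy' : y = rb := hy
      show pvPf (d.insert rb ra) y = ra
      rw [hpf', if_pos hy']
    | succ n ihn =>
      intro y hy
      by_cases hyrb : y = rb
      · rw [hyrb] at hy ⊢
        have hstep : pvIt (d.insert rb ra) (n + 1 + 1) rb
            = pvIt (d.insert rb ra) (n + 1) ra := by
          show pvIt (d.insert rb ra) (n + 1) (pvPf (d.insert rb ra) rb) = _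
          rw [hpf', if_pos rfl]
        rw [hstep, pvIt_absorb (n := 0) hrootP_ra (by omega)]
        rfl
      · show pvIt (d.insert rb ra) (n + 1) (pvPf (d.insert rb ra) y) = ra
        rw [hpf', if_neg hyrb]
        exact ihn (pvPf d y) hy
  have reach2 : ∀ n y, pvRootP d (pvIt d n y) → pvIt d n y ≠ rb →
      pvIt (d.insert rb ra) n y = pvIt d n y := by
    intro n
    induction n with
    | zero => intro y _ _; rfl
    | succ n ihn =>
      intro y hy hne2
      by_cases hyrb : y = rb
      · rw [hyrb] at hne2
        have : pvIt d (n + 1) rb = rb := pvIt_absorb (n := 0) hrb (by omega)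
        exact absurd this hne2
      · show pvIt (d.insert rb ra) n (pvPf (d.insert rb ra) y) = pvIt d (n + 1) y
        rw [hpf', if_neg hyrb]
        exact ihn (pvPf d y) hy hne2
  have hrootP' : ∀ r, pvRootP d r → r ≠ rb → pvRootP (d.insert rb ra) r := by
    intro r hr hner; exact pv_rootP_insert_ne hr hner _
  have hwf' : pvWF (d.insert rb ra) := by
    constructor
    · intro k v hget
      rw [PySem.Dict.get?_insert] at hget
      rw [pv_contains_insert_eq hcb]
      split_ifs at hget with hk
      · cases hget; exact hcra
      · exact h.1 k v hget
    · intro y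
      by_cases hy : pvRoot d y = rb
      · exact ⟨d.size + 1, by rw [reach1 _ _ hy]; exact hrootP_ra⟩
      · refine ⟨d.size, ?_⟩
        rw [reach2 _ _ (pv_bound h y) hy]
        exact hrootP' _ (pv_bound h y) hy
  refine ⟨hwf', pv_size_insert_of_contains hcb _, fun y => pv_contains_insert_eq hcb _ y,
    fun y => ?_⟩
  by_cases hy : pvRoot d y = rb
  · rw [if_pos hy]
    have h1 : pvIt (d.insert rb ra) (d.size + 1) y = ra := reach1 _ _ hy
    rw [pvRoot_char hwf' (n := d.size + 1) (by rw [h1]; exact hrootP_ra), h1]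
  · rw [if_neg hy]
    have h1 : pvIt (d.insert rb ra) d.size y = pvIt d d.size y :=
      reach2 _ _ (pv_bound h y) hy
    rw [pvRoot_char hwf' (n := d.size) (by rw [h1]; exact hrootP' _ (pv_bound h y) hy), h1]
    rfl

-- ---------- the coupling invariant between A's and B's states ----------

/-- B's group label of `c`. -/
def pvG (gof : PySem.Dict String String) (c : String) : String := gof.getD c c

def pvInv (d : PySem.Dict String String) (sz : PySem.Dict String Int)
    (gof : PySem.Dict String String) (mem : PySem.Dict String (List String)) : Prop :=
  pvWF d ∧
  (∀ c, d.contains c = gof.contains c) ∧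
  (∀ c c', d.contains c = true → d.contains c' = true →
      (pvRoot d c = pvRoot d c' ↔ pvG gof c = pvG gof c')) ∧
  (∀ c, d.contains c = true →
      sz.getD (pvRoot d c) 0 = ((mem.getD (pvG gof c) []).length : Int)) ∧
  (∀ c, d.contains c = true → c ∈ mem.getD (pvG gof c) []) ∧
  (∀ g l, mem.get? g = some l → ∀ c ∈ l, d.contains c = true ∧ pvG gof c = g)

theorem pv_getD_relabel (l : List String) (m : PySem.Dict String String)
    (g c : String) (dflt : String) :
    (pvRelabel m l g).getD c dflt = if c ∈ l then g else m.getD c dflt := by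
  induction l generalizing m with
  | nil => simp [pvRelabel]
  | cons x l ih =>
    show (pvRelabel (m.insert x g) l g).getD c dflt = _
    rw [ih, PySem.Dict.getD_insert]
    by_cases h1 : c ∈ l
    · simp [h1]
    · by_cases h2 : c = x <;> simp [h1, h2]

theorem pv_contains_relabel (l : List String) (m : PySem.Dict String String)
    (g y : String) :
    (pvRelabel m l g).contains y = (decide (y ∈ l) || m.contains y) := by
  induction l generalizing m with
  | nil => simp [pvRelabel]
  | cons x l ih =>
    show (pvRelabel (m.insert x g) l g).contains y = _
    rw [ih, PySem.Dict.contains_insert]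
    by_cases h1 : y ∈ l
    · simp [h1]
    · by_cases h2 : y = x <;> simp [h1, h2]

theorem pv_get?_erase (d : PySem.Dict String (List String)) (k k' : String) :
    (d.erase k).get? k' = if k' = k then none else d.get? k' := by
  obtain ⟨items⟩ := d
  induction items with
  | nil => simp [PySem.Dict.erase, PySem.Dict.get?]
  | cons p rest ih =>
    by_cases hp : p.1 = k
    · have : (PySem.Dict.mk (p :: rest)).erase k = (PySem.Dict.mk rest).erase k := by
        simp [PySem.Dict.erase, hp]
      rw [this, ih]
      by_cases h2 : k' = k
      · simp [h2]
      · simp only [h2, if_false]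
        obtain ⟨p1, p2⟩ := p
        rw [PySem.Dict.get?_mk_cons]
        simp only at hp
        have : (p1 == k') = false := by simp [hp, Ne.symm h2]
        simp [this]
    · have : (PySem.Dict.mk (p :: rest)).erase k
          = PySem.Dict.mk (p :: ((PySem.Dict.mk rest).erase k).items) := by
        simp [PySem.Dict.erase, hp]
      rw [this]
      obtain ⟨p1, p2⟩ := p
      rw [PySem.Dict.get?_mk_cons, PySem.Dict.get?_mk_cons]
      simp only at hp
      by_cases h3 : p1 = k'
      · subst h3
        simp [hp]
      · have : (p1 == k') = false := by simp [h3]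
        simp only [this, Bool.false_eq_true, if_false]
        exact ih

theorem pv_transport {d d' : PySem.Dict String String} {sz : PySem.Dict String Int}
    {gof : PySem.Dict String String} {mem : PySem.Dict String (List String)}
    (h : pvInv d sz gof mem) (hwf' : pvWF d')
    (hcont : ∀ y, d'.contains y = d.contains y)
    (hroot : ∀ y, pvRoot d' y = pvRoot d y) : pvInv d' sz gof mem := by
  obtain ⟨_, h2, h3, h4, h5, h6⟩ := h
  refine ⟨hwf', fun c => (hcont c).trans (h2 c), ?_, ?_, ?_, ?_⟩
  · intro c c' hc hc'
    rw [hroot, hroot]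
    exact h3 c c' ((hcont c).symm.trans hc) ((hcont c').symm.trans hc')
  · intro c hc
    rw [hroot]
    exact h4 c ((hcont c).symm.trans hc)
  · intro c hc
    exact h5 c ((hcont c).symm.trans hc)
  · intro g lst hget c hcl
    obtain ⟨ha, hb⟩ := h6 g lst hget c hcl
    exact ⟨(hcont c).trans ha, hb⟩

theorem pv_merge {d : PySem.Dict String String} {sz : PySem.Dict String Int}
    {gof : PySem.Dict String String} {mem : PySem.Dict String (List String)}
    (h : pvInv d sz gof mem) {u v : String}
    (hcu : d.contains u = true) (hcv : d.contains v = true)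
    (hne : pvRoot d u ≠ pvRoot d v) :
    pvInv (d.insert (pvRoot d v) (pvRoot d u))
          (sz.insert (pvRoot d u) (sz.getD (pvRoot d u) 0 + sz.getD (pvRoot d v) 0))
          (pvRelabel gof (mem.getD (pvG gof v) []) (pvG gof u))
          ((mem.insert (pvG gof u) (mem.getD (pvG gof u) [] ++ mem.getD (pvG gof v) [])).erase (pvG gof v)) := by
  obtain ⟨hwf, hkeys, hpart, hsizes, hcov, hsound⟩ := h
  have hgne : pvG gof u ≠ pvG gof v := fun hE => hne ((hpart u v hcu hcv).mpr hE)
  have hrPu : pvRootP d (pvRoot d u) := pvRootP_pvRoot hwf u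
  have hrPv : pvRootP d (pvRoot d v) := pvRootP_pvRoot hwf v
  have hcru : d.contains (pvRoot d u) = true := pv_contains_pvIt hwf.1 hcu d.size
  have hcrv : d.contains (pvRoot d v) = true := pv_contains_pvIt hwf.1 hcv d.size
  obtain ⟨hwf', hsz', hcont', hroots'⟩ := pv_link hwf hrPu hrPv hcrv hcru hne
  have hspec : ∀ g0, ∀ c ∈ mem.getD g0 [], d.contains c = true ∧ pvG gof c = g0 := by
    intro g0 c hc
    rcases hq : mem.get? g0 with _ | lv
    · rw [PySem.Dict.getD_eq_get?_getD, hq] at hc; simp at hc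
    · rw [PySem.Dict.getD_eq_get?_getD, hq] at hc
      exact hsound g0 lv hq c hc
  have hmemv : ∀ c, d.contains c = true →
      (c ∈ mem.getD (pvG gof v) [] ↔ pvG gof c = pvG gof v) := by
    intro c hc
    constructor
    · intro hcm; exact (hspec _ c hcm).2
    · intro hgc
      have := hcov c hc
      rw [hgc] at this
      exact this
  have hG' : ∀ c, d.contains c = true →
      pvG (pvRelabel gof (mem.getD (pvG gof v) []) (pvG gof u)) c
        = if pvG gof c = pvG gof v then pvG gof u else pvG gof c := by
    intro c hc
    show (pvRelabel gof (mem.getD (pvG gof v) []) (pvG gof u)).getD c c = _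
    rw [pv_getD_relabel]
    by_cases hcm : c ∈ mem.getD (pvG gof v) []
    · rw [if_pos hcm, if_pos ((hmemv c hc).mp hcm)]
    · rw [if_neg hcm, if_neg (fun hg => hcm ((hmemv c hc).mpr hg))]
      rfl
  have hcorr_u : ∀ c, d.contains c = true → (pvRoot d c = pvRoot d u ↔ pvG gof c = pvG gof u) :=
    fun c hc => hpart c u hc hcu
  have hcorr_v : ∀ c, d.contains c = true → (pvRoot d c = pvRoot d v ↔ pvG gof c = pvG gof v) :=
    fun c hc => hpart c v hc hcv
  have hmem'_get? : ∀ g0, ((mem.insert (pvG gof u) (mem.getD (pvG gof u) [] ++ mem.getD (pvG gof v) [])).erase (pvG gof v)).get? g0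
      = if g0 = pvG gof v then none
        else if g0 = pvG gof u then some (mem.getD (pvG gof u) [] ++ mem.getD (pvG gof v) [])
        else mem.get? g0 := by
    intro g0
    rw [pv_get?_erase, PySem.Dict.get?_insert]
  have hmem'_getD : ∀ g0, ((mem.insert (pvG gof u) (mem.getD (pvG gof u) [] ++ mem.getD (pvG gof v) [])).erase (pvG gof v)).getD g0 []
      = if g0 = pvG gof v then []
        else if g0 = pvG gof u then mem.getD (pvG gof u) [] ++ mem.getD (pvG gof v) []
        else mem.getD g0 [] := by
    intro g0
    rw [PySem.Dict.getD_eq_get?_getD, hmem'_get? g0]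
    split_ifs <;> simp [PySem.Dict.getD_eq_get?_getD]
  have hsz'_getD : ∀ r, (sz.insert (pvRoot d u) (sz.getD (pvRoot d u) 0 + sz.getD (pvRoot d v) 0)).getD r 0
      = if r = pvRoot d u then sz.getD (pvRoot d u) 0 + sz.getD (pvRoot d v) 0 else sz.getD r 0 := by
    intro r; rw [PySem.Dict.getD_insert]
  have hsum : sz.getD (pvRoot d u) 0 + sz.getD (pvRoot d v) 0
      = (((mem.getD (pvG gof u) [] ++ mem.getD (pvG gof v) []).length : Int)) := by
    rw [hsizes u hcu, hsizes v hcv, List.length_append]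
    push_cast
    ring
  refine ⟨hwf', ?_, ?_, ?_, ?_, ?_⟩
  · intro c
    rw [hcont' c, hkeys c, pv_contains_relabel]
    by_cases hcm : c ∈ mem.getD (pvG gof v) []
    · have hcc : gof.contains c = true := by rw [← hkeys]; exact (hspec _ c hcm).1
      rw [hcc]
      simp [hcm]
    · simp [hcm]
  · intro c c' hc hc'
    rw [hcont'] at hc hc'
    rw [hroots' c, hroots' c', hG' c hc, hG' c' hc']
    by_cases a1 : pvRoot d c = pvRoot d v <;> by_cases a2 : pvRoot d c' = pvRoot d v
    · rw [if_pos a1, if_pos a2, if_pos ((hcorr_v c hc).mp a1), if_pos ((hcorr_v c' hc').mp a2)]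
      exact ⟨fun _ => rfl, fun _ => rfl⟩
    · rw [if_pos a1, if_neg a2, if_pos ((hcorr_v c hc).mp a1),
        if_neg (fun hg => a2 ((hcorr_v c' hc').mpr hg))]
      exact ⟨fun hE => ((hcorr_u c' hc').mp hE.symm).symm,
        fun hE => ((hcorr_u c' hc').mpr hE.symm).symm⟩
    · rw [if_neg a1, if_pos a2, if_neg (fun hg => a1 ((hcorr_v c hc).mpr hg)),
        if_pos ((hcorr_v c' hc').mp a2)]
      exact hcorr_u c hc
    · rw [if_neg a1, if_neg a2, if_neg (fun hg => a1 ((hcorr_v c hc).mpr hg)),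
        if_neg (fun hg => a2 ((hcorr_v c' hc').mpr hg))]
      exact hpart c c' hc hc'
  · intro c hc
    rw [hcont'] at hc
    rw [hroots' c, hG' c hc, hsz'_getD, hmem'_getD]
    by_cases a1 : pvRoot d c = pvRoot d v
    · rw [if_pos a1, if_pos ((hcorr_v c hc).mp a1), if_pos rfl, if_neg hgne, if_pos rfl]
      exact hsum
    · rw [if_neg a1, if_neg (fun hg => a1 ((hcorr_v c hc).mpr hg))]
      by_cases a2 : pvRoot d c = pvRoot d u
      · rw [if_pos a2, if_neg (fun hg => hgne (((hcorr_u c hc).mp a2).symm.trans hg)),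
          if_pos ((hcorr_u c hc).mp a2)]
        exact hsum
      · rw [if_neg a2, if_neg (fun hg => a1 ((hcorr_v c hc).mpr hg)),
          if_neg (fun hg => a2 ((hcorr_u c hc).mpr hg))]
        exact hsizes c hc
  · intro c hc
    rw [hcont'] at hc
    rw [hG' c hc, hmem'_getD]
    by_cases a : pvG gof c = pvG gof v
    · rw [if_pos a, if_neg hgne, if_pos rfl]
      exact List.mem_append.mpr (Or.inr ((hmemv c hc).mpr a))
    · rw [if_neg a, if_neg a]
      by_cases b : pvG gof c = pvG gof u
      · rw [if_pos b]
        refine List.mem_append.mpr (Or.inl ?_)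
        have := hcov c hc
        rw [b] at this
        exact this
      · rw [if_neg b]
        exact hcov c hc
  · intro g0 lst hget c hcl
    rw [hmem'_get? g0] at hget
    split_ifs at hget with e1 e2
    · injection hget with hE
      subst hE
      rcases List.mem_append.mp hcl with hin | hin
      · obtain ⟨hic, hig⟩ := hspec _ c hin
        refine ⟨(hcont' c).trans hic, ?_⟩
        rw [hG' c hic, if_neg (fun hg => hgne (hig.symm.trans hg)), hig, e2]
      · obtain ⟨hic, hig⟩ := hspec _ c hin
        refine ⟨(hcont' c).trans hic, ?_⟩
        rw [hG' c hic, if_pos hig, e2]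
    · obtain ⟨hic, hig⟩ := hsound g0 lst hget c hcl
      refine ⟨(hcont' c).trans hic, ?_⟩
      rw [hG' c hic, if_neg (fun hg => e1 (hig.symm.trans hg))]
      exact hig

theorem pvUnion_eq (d : PySem.Dict String String) (sz : PySem.Dict String Int)
    (a b : String) (maxg : Int) (hwf : pvWF d) :
    pvUnion d sz a b maxg =
      if pvRoot d a = pvRoot d b then
        ((pvFind (pvFind d.size d a).2.size (pvFind d.size d a).2 b).2, sz)
      else if sz.getD (pvRoot d a) 0 + sz.getD (pvRoot d b) 0 > maxg then
        ((pvFind (pvFind d.size d a).2.size (pvFind d.size d a).2 b).2, sz)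
      else if sz.getD (pvRoot d a) 0 < sz.getD (pvRoot d b) 0 then
        ((pvFind (pvFind d.size d a).2.size (pvFind d.size d a).2 b).2.insert
            (pvRoot d a) (pvRoot d b),
          sz.insert (pvRoot d b) (sz.getD (pvRoot d b) 0 + sz.getD (pvRoot d a) 0))
      else
        ((pvFind (pvFind d.size d a).2.size (pvFind d.size d a).2 b).2.insert
            (pvRoot d b) (pvRoot d a),
          sz.insert (pvRoot d a) (sz.getD (pvRoot d a) 0 + sz.getD (pvRoot d b) 0)) := by
  obtain ⟨f1a, f2a, _, _, f5a⟩ := pvFind_spec d.size d a hwf (pv_bound hwf a)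
  obtain ⟨f1b, _, _, _, _⟩ :=
    pvFind_spec (pvFind d.size d a).2.size (pvFind d.size d a).2 b f2a (pv_bound f2a b)
  have hr2 : (pvFind (pvFind d.size d a).2.size (pvFind d.size d a).2 b).1 = pvRoot d b :=
    f1b.trans (f5a b)
  simp only [pvUnion, f1a, hr2]
  by_cases h1 : pvRoot d a = pvRoot d b
  · simp [h1]
  · rw [if_pos h1, if_neg h1]
    by_cases h2 : sz.getD (pvRoot d a) 0 + sz.getD (pvRoot d b) 0 > maxg
    · rw [if_pos h2, if_pos h2]
    · rw [if_neg h2, if_neg h2]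
      by_cases h3 : sz.getD (pvRoot d a) 0 < sz.getD (pvRoot d b) 0
      · rw [if_pos h3, if_pos h3]
      · rw [if_neg h3, if_neg h3]

-- one edge step of both programs preserves the invariant
theorem pv_step (maxg : Int) (e : String × String)
    {d : PySem.Dict String String} {sz : PySem.Dict String Int}
    {gof : PySem.Dict String String} {mem : PySem.Dict String (List String)}
    (h : pvInv d sz gof mem) :
    pvInv (if d.contains e.1 && d.contains e.2 then pvUnion d sz e.1 e.2 maxg else (d, sz)).1
          (if d.contains e.1 && d.contains e.2 then pvUnion d sz e.1 e.2 maxg else (d, sz)).2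
          (match gof.get? e.1, gof.get? e.2 with
            | some ga, some gb =>
              if ga = gb then (gof, mem)
              else
                let ma := mem.getD ga []
                let mb := mem.getD gb []
                if (ma.length : Int) + (mb.length : Int) > maxg then (gof, mem)
                else
                  let q := if ma.length < mb.length then (gb, ga, mb, ma) else (ga, gb, ma, mb)
                  (pvRelabel gof q.2.2.2 q.1, (mem.insert q.1 (q.2.2.1 ++ q.2.2.2)).erase q.2.1)
            | _, _ => (gof, mem)).1
          (match gof.get? e.1, gof.get? e.2 with
            | some ga, some gb =>
              if ga = gb then (gof, mem)
              else
                let ma := mem.getD ga []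
                let mb := mem.getD gb []
                if (ma.length : Int) + (mb.length : Int) > maxg then (gof, mem)
                else
                  let q := if ma.length < mb.length then (gb, ga, mb, ma) else (ga, gb, ma, mb)
                  (pvRelabel gof q.2.2.2 q.1, (mem.insert q.1 (q.2.2.1 ++ q.2.2.2)).erase q.2.1)
            | _, _ => (gof, mem)).2 ∧
    (∀ y, (if d.contains e.1 && d.contains e.2 then pvUnion d sz e.1 e.2 maxg else (d, sz)).1.contains y
          = d.contains y) := by
  have hInv := h
  obtain ⟨hwf, hkeys, hpart, hsizes, hcov, hsound⟩ := h
  rcases hga : gof.get? e.1 with _ | ga <;> rcases hgb : gof.get? e.2 with _ | gb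
  · have hc1 : d.contains e.1 = false := by
      rw [hkeys, PySem.Dict.contains_eq_isSome_get?, hga]; rfl
    rw [if_neg (show ¬ (d.contains e.1 && d.contains e.2) = true by rw [hc1]; simp)]
    exact ⟨hInv, fun y => rfl⟩
  · have hc1 : d.contains e.1 = false := by
      rw [hkeys, PySem.Dict.contains_eq_isSome_get?, hga]; rfl
    rw [if_neg (show ¬ (d.contains e.1 && d.contains e.2) = true by rw [hc1]; simp)]
    exact ⟨hInv, fun y => rfl⟩
  · have hc2 : d.contains e.2 = false := by
      rw [hkeys, PySem.Dict.contains_eq_isSome_get?, hgb]; rfl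
    rw [if_neg (show ¬ (d.contains e.1 && d.contains e.2) = true by rw [hc2]; simp)]
    exact ⟨hInv, fun y => rfl⟩
  · have hc1 : d.contains e.1 = true := by
      rw [hkeys, PySem.Dict.contains_eq_isSome_get?, hga]; rfl
    have hc2 : d.contains e.2 = true := by
      rw [hkeys, PySem.Dict.contains_eq_isSome_get?, hgb]; rfl
    have hG1 : pvG gof e.1 = ga := by
      show gof.getD e.1 e.1 = ga
      rw [PySem.Dict.getD_eq_get?_getD, hga]; rfl
    have hG2 : pvG gof e.2 = gb := by
      show gof.getD e.2 e.2 = gb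
      rw [PySem.Dict.getD_eq_get?_getD, hgb]; rfl
    obtain ⟨f1a, f2a, _, f4a, f5a⟩ := pvFind_spec d.size d e.1 hwf (pv_bound hwf e.1)
    obtain ⟨f1b, f2b, _, f4b, f5b⟩ := pvFind_spec (pvFind d.size d e.1).2.size
      (pvFind d.size d e.1).2 e.2 f2a (pv_bound f2a e.2)
    have hd2wf : pvWF (pvFind (pvFind d.size d e.1).2.size (pvFind d.size d e.1).2 e.2).2 := f2b
    have hd2cont : ∀ y, (pvFind (pvFind d.size d e.1).2.size (pvFind d.size d e.1).2 e.2).2.contains y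
        = d.contains y := fun y => (f4b y).trans (f4a y)
    have hd2root : ∀ y, pvRoot (pvFind (pvFind d.size d e.1).2.size (pvFind d.size d e.1).2 e.2).2 y
        = pvRoot d y := fun y => (f5b y).trans (f5a y)
    have hInv2 : pvInv (pvFind (pvFind d.size d e.1).2.size (pvFind d.size d e.1).2 e.2).2 sz gof mem :=
      pv_transport hInv hd2wf hd2cont hd2root
    rw [if_pos (by rw [hc1, hc2]; rfl)]
    show pvInv (pvUnion d sz e.1 e.2 maxg).1 (pvUnion d sz e.1 e.2 maxg).2
        (if ga = gb then (gof, mem)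
          else if ((mem.getD ga []).length : Int) + ((mem.getD gb []).length : Int) > maxg then (gof, mem)
          else (pvRelabel gof
                  (if (mem.getD ga []).length < (mem.getD gb []).length
                    then (gb, ga, mem.getD gb [], mem.getD ga [])
                    else (ga, gb, mem.getD ga [], mem.getD gb [])).2.2.2
                  (if (mem.getD ga []).length < (mem.getD gb []).length
                    then (gb, ga, mem.getD gb [], mem.getD ga [])
                    else (ga, gb, mem.getD ga [], mem.getD gb [])).1,
                (mem.insert
                    (if (mem.getD ga []).length < (mem.getD gb []).length
                      then (gb, ga, mem.getD gb [], mem.getD ga [])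
                      else (ga, gb, mem.getD ga [], mem.getD gb [])).1
                    ((if (mem.getD ga []).length < (mem.getD gb []).length
                      then (gb, ga, mem.getD gb [], mem.getD ga [])
                      else (ga, gb, mem.getD ga [], mem.getD gb [])).2.2.1 ++
                     (if (mem.getD ga []).length < (mem.getD gb []).length
                      then (gb, ga, mem.getD gb [], mem.getD ga [])
                      else (ga, gb, mem.getD ga [], mem.getD gb [])).2.2.2)).erase
                  (if (mem.getD ga []).length < (mem.getD gb []).length
                    then (gb, ga, mem.getD gb [], mem.getD ga [])
                    else (ga, gb, mem.getD ga [], mem.getD gb [])).2.1)).1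
        (if ga = gb then (gof, mem)
          else if ((mem.getD ga []).length : Int) + ((mem.getD gb []).length : Int) > maxg then (gof, mem)
          else (pvRelabel gof
                  (if (mem.getD ga []).length < (mem.getD gb []).length
                    then (gb, ga, mem.getD gb [], mem.getD ga [])
                    else (ga, gb, mem.getD ga [], mem.getD gb [])).2.2.2
                  (if (mem.getD ga []).length < (mem.getD gb []).length
                    then (gb, ga, mem.getD gb [], mem.getD ga [])
                    else (ga, gb, mem.getD ga [], mem.getD gb [])).1,
                (mem.insert
                    (if (mem.getD ga []).length < (mem.getD gb []).length
                      then (gb, ga, mem.getD gb [], mem.getD ga [])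
                      else (ga, gb, mem.getD ga [], mem.getD gb [])).1
                    ((if (mem.getD ga []).length < (mem.getD gb []).length
                      then (gb, ga, mem.getD gb [], mem.getD ga [])
                      else (ga, gb, mem.getD ga [], mem.getD gb [])).2.2.1 ++
                     (if (mem.getD ga []).length < (mem.getD gb []).length
                      then (gb, ga, mem.getD gb [], mem.getD ga [])
                      else (ga, gb, mem.getD ga [], mem.getD gb [])).2.2.2)).erase
                  (if (mem.getD ga []).length < (mem.getD gb []).length
                    then (gb, ga, mem.getD gb [], mem.getD ga [])
                    else (ga, gb, mem.getD ga [], mem.getD gb [])).2.1)).2 ∧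
        (∀ y, (pvUnion d sz e.1 e.2 maxg).1.contains y = d.contains y)
    rw [pvUnion_eq d sz e.1 e.2 maxg hwf]
    by_cases hrr : pvRoot d e.1 = pvRoot d e.2
    · have hgg : ga = gb := by
        rw [← hG1, ← hG2]; exact (hpart e.1 e.2 hc1 hc2).mp hrr
      rw [if_pos hrr, if_pos hgg]
      exact ⟨hInv2, hd2cont⟩
    · have hgg : ¬ ga = gb := fun hE =>
        hrr ((hpart e.1 e.2 hc1 hc2).mpr (by rw [hG1, hG2, hE]))
      rw [if_neg hrr, if_neg hgg]
      have hsa : sz.getD (pvRoot d e.1) 0 = ((mem.getD ga []).length : Int) := by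
        rw [← hG1]; exact hsizes e.1 hc1
      have hsb : sz.getD (pvRoot d e.2) 0 = ((mem.getD gb []).length : Int) := by
        rw [← hG2]; exact hsizes e.2 hc2
      by_cases hcap : ((mem.getD ga []).length : Int) + ((mem.getD gb []).length : Int) > maxg
      · rw [if_pos (by rw [hsa, hsb]; exact hcap), if_pos hcap]
        exact ⟨hInv2, hd2cont⟩
      · rw [if_neg (by rw [hsa, hsb]; exact hcap), if_neg hcap]
        by_cases hsw : (mem.getD ga []).length < (mem.getD gb []).length
        · have hswA : sz.getD (pvRoot d e.1) 0 < sz.getD (pvRoot d e.2) 0 := by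
            rw [hsa, hsb]; exact_mod_cast hsw
          rw [if_pos hswA, if_pos hsw]
          have hm := pv_merge hInv2 (u := e.2) (v := e.1)
            (by rw [hd2cont]; exact hc2) (by rw [hd2cont]; exact hc1)
            (by rw [hd2root, hd2root]; exact fun hE => hrr hE.symm)
          rw [hd2root, hd2root, hG1, hG2] at hm
          refine ⟨hm, fun y => ?_⟩
          have hcrv : (pvFind (pvFind d.size d e.1).2.size (pvFind d.size d e.1).2 e.2).2.contains
              (pvRoot d e.1) = true := by
            rw [hd2cont]
            exact pv_contains_pvIt hwf.1 hc1 d.size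
          exact (pv_contains_insert_eq hcrv _ y).trans (hd2cont y)
        · have hswA : ¬ sz.getD (pvRoot d e.1) 0 < sz.getD (pvRoot d e.2) 0 := by
            rw [hsa, hsb]; exact_mod_cast hsw
          rw [if_neg hswA, if_neg hsw]
          have hm := pv_merge hInv2 (u := e.1) (v := e.2)
            (by rw [hd2cont]; exact hc1) (by rw [hd2cont]; exact hc2)
            (by rw [hd2root, hd2root]; exact hrr)
          rw [hd2root, hd2root, hG1, hG2] at hm
          refine ⟨hm, fun y => ?_⟩
          have hcrv : (pvFind (pvFind d.size d e.1).2.size (pvFind d.size d e.1).2 e.2).2.contains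
              (pvRoot d e.2) = true := by
            rw [hd2cont]
            exact pv_contains_pvIt hwf.1 hc2 d.size
          exact (pv_contains_insert_eq hcrv _ y).trans (hd2cont y)

theorem pv_fold_edges (maxg : Int) :
    ∀ (es : List (String × String)) (d : PySem.Dict String String)
      (sz : PySem.Dict String Int) (gof : PySem.Dict String String)
      (mem : PySem.Dict String (List String)), pvInv d sz gof mem →
    pvInv (es.foldl (fun st e =>
            if st.1.contains e.1 && st.1.contains e.2 then pvUnion st.1 st.2 e.1 e.2 maxg
            else st) (d, sz)).1
          (es.foldl (fun st e =>
            if st.1.contains e.1 && st.1.contains e.2 then pvUnion st.1 st.2 e.1 e.2 maxg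
            else st) (d, sz)).2
          (es.foldl (fun st e =>
            match st.1.get? e.1, st.1.get? e.2 with
            | some ga, some gb =>
              if ga = gb then st
              else
                let ma := st.2.getD ga []
                let mb := st.2.getD gb []
                if (ma.length : Int) + (mb.length : Int) > maxg then st
                else
                  let q := if ma.length < mb.length then (gb, ga, mb, ma) else (ga, gb, ma, mb)
                  (pvRelabel st.1 q.2.2.2 q.1, (st.2.insert q.1 (q.2.2.1 ++ q.2.2.2)).erase q.2.1)
            | _, _ => st) (gof, mem)).1
          (es.foldl (fun st e =>
            match st.1.get? e.1, st.1.get? e.2 with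
            | some ga, some gb =>
              if ga = gb then st
              else
                let ma := st.2.getD ga []
                let mb := st.2.getD gb []
                if (ma.length : Int) + (mb.length : Int) > maxg then st
                else
                  let q := if ma.length < mb.length then (gb, ga, mb, ma) else (ga, gb, ma, mb)
                  (pvRelabel st.1 q.2.2.2 q.1, (st.2.insert q.1 (q.2.2.1 ++ q.2.2.2)).erase q.2.1)
            | _, _ => st) (gof, mem)).2 ∧
    (∀ y, (es.foldl (fun st e =>
            if st.1.contains e.1 && st.1.contains e.2 then pvUnion st.1 st.2 e.1 e.2 maxg
            else st) (d, sz)).1.contains y = d.contains y) := by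
  intro es
  induction es with
  | nil => intro d sz gof mem h; exact ⟨h, fun _ => rfl⟩
  | cons e es ih =>
    intro d sz gof mem h
    obtain ⟨hstep, hcont⟩ := pv_step maxg e h
    obtain ⟨ih1, ih2⟩ := ih _ _ _ _ hstep
    simp only [List.foldl_cons]
    exact ⟨ih1, fun y => (ih2 y).trans (hcont y)⟩

-- ---------- initial states ----------

theorem pv_get_foldl_self : ∀ (l : List String) (d : PySem.Dict String String) (c : String),
    ((l.foldl (fun d x => d.insert x x) d).get? c) = if c ∈ l then some c else d.get? c := by
  intro l
  induction l with
  | nil => simp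
  | cons x l ih =>
    intro d c
    show ((l.foldl (fun d x => d.insert x x) (d.insert x x)).get? c) = _
    rw [ih, PySem.Dict.get?_insert]
    by_cases h1 : c ∈ l
    · simp [h1]
    · by_cases h2 : c = x <;> simp [h1, h2]

theorem pv_get_foldl_one : ∀ (l : List String) (d : PySem.Dict String Int) (c : String),
    ((l.foldl (fun d x => d.insert x (1 : Int)) d).get? c) = if c ∈ l then some 1 else d.get? c := by
  intro l
  induction l with
  | nil => simp
  | cons x l ih =>
    intro d c
    show ((l.foldl (fun d x => d.insert x (1 : Int)) (d.insert x 1)).get? c) = _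
    rw [ih, PySem.Dict.get?_insert]
    by_cases h1 : c ∈ l
    · simp [h1]
    · by_cases h2 : c = x <;> simp [h1, h2]

theorem pv_init_alt : ∀ (l : List String)
    (st : PySem.Dict String String × PySem.Dict String (List String)),
    (∀ c, st.1.get? c = none ∨ st.1.get? c = some c) →
    (∀ c, st.2.get? c = if st.1.contains c then some [c] else none) →
    (∀ c, (l.foldl (fun st c => if st.1.contains c then st
              else (st.1.insert c c, st.2.insert c [c])) st).1.get? c
        = if c ∈ l ∨ (st.1.get? c).isSome then some c else none) ∧
    (∀ c, (l.foldl (fun st c => if st.1.contains c then st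
              else (st.1.insert c c, st.2.insert c [c])) st).2.get? c
        = if c ∈ l ∨ (st.1.get? c).isSome then some [c] else none) := by
  intro l
  induction l with
  | nil =>
    intro st h1 h2
    constructor
    · intro c
      simp only [List.foldl_nil, List.not_mem_nil, false_or]
      rcases h1 c with hc | hc <;> simp [hc]
    · intro c
      simp only [List.foldl_nil, List.not_mem_nil, false_or]
      rw [h2 c, PySem.Dict.contains_eq_isSome_get?]
  | cons x l ih =>
    intro st h1 h2
    by_cases hx : st.1.contains x = true
    · have hsome : (st.1.get? x).isSome = true := by
        rw [← PySem.Dict.contains_eq_isSome_get?]; exact hx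
      obtain ⟨ihl, ihr⟩ := ih st h1 h2
      rw [List.foldl_cons, if_pos hx]
      constructor
      · intro c
        rw [ihl c]
        by_cases hcx : c = x
        · subst hcx
          simp [hsome]
        · simp [hcx]
      · intro c
        rw [ihr c]
        by_cases hcx : c = x
        · subst hcx
          simp [hsome]
        · simp [hcx]
    · have h1' : ∀ c, (st.1.insert x x).get? c = none ∨ (st.1.insert x x).get? c = some c := by
        intro c
        rw [PySem.Dict.get?_insert]
        by_cases hcx : c = x
        · right; rw [if_pos hcx, hcx]
        · rw [if_neg hcx]; exact h1 c
      have h2' : ∀ c, (st.2.insert x [x]).get? c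
          = if (st.1.insert x x).contains c then some [c] else none := by
        intro c
        rw [PySem.Dict.get?_insert, PySem.Dict.contains_insert]
        by_cases hcx : c = x
        · subst hcx; simp
        · simp only [hcx, if_false]
          have hb : (c == x) = false := by simpa using hcx
          rw [hb]
          simpa using h2 c
      obtain ⟨ihl, ihr⟩ := ih (st.1.insert x x, st.2.insert x [x]) h1' h2'
      rw [List.foldl_cons, if_neg hx]
      constructor
      · intro c
        rw [ihl c]
        simp only [PySem.Dict.get?_insert]
        by_cases hcx : c = x
        · subst hcx; simp
        · simp [hcx]
      · intro c
        rw [ihr c]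
        simp only [PySem.Dict.get?_insert]
        by_cases hcx : c = x
        · subst hcx; simp
        · simp [hcx]

theorem pv_init (cids : List String) :
    pvInv (cids.foldl (fun d c => d.insert c c) PySem.Dict.empty)
          (cids.foldl (fun d c => d.insert c (1 : Int)) PySem.Dict.empty)
          (cids.foldl (fun st c => if st.1.contains c then st
              else (st.1.insert c c, st.2.insert c [c]))
              (PySem.Dict.empty, PySem.Dict.empty)).1
          (cids.foldl (fun st c => if st.1.contains c then st
              else (st.1.insert c c, st.2.insert c [c]))
              (PySem.Dict.empty, PySem.Dict.empty)).2 := by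
  obtain ⟨hg, hm⟩ := pv_init_alt cids (PySem.Dict.empty, PySem.Dict.empty)
    (fun c => Or.inl (PySem.Dict.get?_empty c)) (fun c => by simp)
  have hg' : ∀ c, (cids.foldl (fun st c => if st.1.contains c then st
        else (st.1.insert c c, st.2.insert c [c]))
        (PySem.Dict.empty, PySem.Dict.empty)).1.get? c
      = if c ∈ cids then some c else none := by
    intro c; rw [hg c]; simp
  have hm' : ∀ c, (cids.foldl (fun st c => if st.1.contains c then st
        else (st.1.insert c c, st.2.insert c [c]))
        (PySem.Dict.empty, PySem.Dict.empty)).2.get? c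
      = if c ∈ cids then some [c] else none := by
    intro c; rw [hm c]; simp
  have hp' : ∀ c, (cids.foldl (fun d c => d.insert c c) PySem.Dict.empty).get? c
      = if c ∈ cids then some c else none := by
    intro c; rw [pv_get_foldl_self]; simp
  have hs' : ∀ c, (cids.foldl (fun d c => d.insert c (1 : Int)) PySem.Dict.empty).get? c
      = if c ∈ cids then some 1 else none := by
    intro c; rw [pv_get_foldl_one]; simp
  set P := cids.foldl (fun d c => d.insert c c) PySem.Dict.empty with hP
  set Z := cids.foldl (fun d c => d.insert c (1 : Int)) PySem.Dict.empty with hZ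
  set st := cids.foldl (fun st c => if st.1.contains c then st
      else (st.1.insert c c, st.2.insert c [c])) (PySem.Dict.empty, PySem.Dict.empty) with hst
  have hPc : ∀ c, P.contains c = decide (c ∈ cids) := by
    intro c
    rw [PySem.Dict.contains_eq_isSome_get?, hp' c]
    by_cases h : c ∈ cids <;> simp [h]
  have hpf : ∀ x, pvPf P x = x := by
    intro x
    show P.getD x x = x
    rw [PySem.Dict.getD_eq_get?_getD, hp' x]
    by_cases h : x ∈ cids <;> simp [h]
  have hit : ∀ n x, pvIt P n x = x := by
    intro n
    induction n with
    | zero => intro x; rfl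
    | succ n ihn => intro x; show pvIt P n (pvPf P x) = x; rw [hpf]; exact ihn x
  have hroot : ∀ x, pvRoot P x = x := fun x => hit _ x
  have hG : ∀ c, pvG st.1 c = c := by
    intro c
    show st.1.getD c c = c
    rw [PySem.Dict.getD_eq_get?_getD, hg' c]
    by_cases h : c ∈ cids <;> simp [h]
  refine ⟨⟨?_, fun x => ⟨0, hpf x⟩⟩, ?_, ?_, ?_, ?_, ?_⟩
  · intro k v hget
    rw [hp' k] at hget
    by_cases h : k ∈ cids
    · rw [if_pos h] at hget
      cases hget
      rw [hPc k]
      simp [h]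
    · rw [if_neg h] at hget; cases hget
  · intro c
    rw [hPc c, PySem.Dict.contains_eq_isSome_get?, hg' c]
    by_cases h : c ∈ cids <;> simp [h]
  · intro c c' _ _
    rw [hroot, hroot, hG, hG]
  · intro c hc
    rw [hPc c] at hc
    have hmem : c ∈ cids := by simpa using hc
    rw [hroot, hG, PySem.Dict.getD_eq_get?_getD, hs' c, if_pos hmem,
      PySem.Dict.getD_eq_get?_getD, hm' c, if_pos hmem]
    rfl
  · intro c hc
    rw [hPc c] at hc
    have hmem : c ∈ cids := by simpa using hc
    rw [hG, PySem.Dict.getD_eq_get?_getD, hm' c, if_pos hmem]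
    simp
  · intro g l hget c hcl
    rw [hm' g] at hget
    by_cases h : g ∈ cids
    · rw [if_pos h] at hget
      cases hget
      have : c = g := by simpa using hcl
      subst this
      exact ⟨by rw [hPc]; simp [h], hG c⟩
    · rw [if_neg h] at hget; cases hget

-- ---------- the final grouping pass ----------

theorem pv_fold_final_A (R : String → String) :
    ∀ (l : List String) (g : PySem.Dict String (PySem.Set String))
      (d : PySem.Dict String String), pvWF d → (∀ y, pvRoot d y = R y) →
    (l.foldl (fun st c =>
        let r := pvFind st.2.size st.2 c
        (st.1.insert r.1 (PySem.Set.add (st.1.getD r.1 PySem.Set.empty) c), r.2)) (g, d)).1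
      = l.foldl (fun g c => g.insert (R c) (PySem.Set.add (g.getD (R c) PySem.Set.empty) c)) g := by
  intro l
  induction l with
  | nil => intro g d _ _; rfl
  | cons c l ih =>
    intro g d hwf hR
    obtain ⟨h1, h2, _, _, h5⟩ := pvFind_spec d.size d c hwf (pv_bound hwf c)
    have hr1 : (pvFind d.size d c).1 = R c := h1.trans (hR c)
    rw [List.foldl_cons, List.foldl_cons]
    show (List.foldl _ (g.insert (pvFind d.size d c).1
        (PySem.Set.add (g.getD (pvFind d.size d c).1 PySem.Set.empty) c),
        (pvFind d.size d c).2) l).1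
      = List.foldl _ (g.insert (R c) (PySem.Set.add (g.getD (R c) PySem.Set.empty) c)) l
    rw [hr1]
    exact ih _ _ h2 (fun y => (h5 y).trans (hR y))

theorem pv_map_repl_eq (l : List (String × PySem.Set String)) (k : String)
    (v : PySem.Set String) (hk : k ∉ l.map (·.1)) :
    List.map (fun p => if p.1 == k then (k, v) else p) l = l := by
  induction l with
  | nil => rfl
  | cons p rest ih =>
    rw [List.map_cons] at hk
    simp only [List.mem_cons, not_or] at hk
    rw [List.map_cons, if_neg (by simpa using fun h : p.1 = k => hk.1 h.symm),
      ih hk.2]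

theorem pv_values_set_list : ∀ (l : List (String × PySem.Set String)) (k : String)
    (v : PySem.Set String), (l.map (·.1)).Nodup → k ∈ l.map (·.1) →
    (List.map (fun p => if p.1 == k then (k, v) else p) l).map (·.2)
      = (l.map (·.2)).set (List.idxOf k (l.map (·.1))) v := by
  intro l
  induction l with
  | nil => intro k v _ hm; simp at hm
  | cons p rest ih =>
    intro k v hnd hm
    rw [List.map_cons] at hm hnd
    by_cases hp : p.1 = k
    · have hb : (p.1 == k) = true := by simpa using hp
      have hrest : k ∉ rest.map (·.1) := by
        rw [← hp]
        exact (List.nodup_cons.mp hnd).1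
      rw [List.map_cons, if_pos hb, pv_map_repl_eq rest k v hrest, ← hp]
      simp [List.idxOf_cons_self]
    · rw [List.map_cons, if_neg (by simpa using hp)]
      have hm' : k ∈ rest.map (·.1) := by
        rcases List.mem_cons.mp hm with h | h
        · exact absurd h.symm hp
        · exact h
      simp only [List.map_cons]
      rw [List.idxOf_cons_ne _ hp, Nat.succ_eq_add_one, List.set_cons_succ,
        ih k v (List.nodup_cons.mp hnd).2 hm']

theorem pv_keys_insert_c (g : PySem.Dict String (PySem.Set String)) {k : String}
    (v : PySem.Set String) (hc : g.contains k = true) : (g.insert k v).keys = g.keys := by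
  show ((g.insert k v).items.map (·.1)) = g.items.map (·.1)
  rw [PySem.Dict.items_insert_of_contains g v hc, List.map_map]
  apply List.map_congr_left
  intro p _
  by_cases hp : p.1 = k
  · simp [hp]
  · simp [hp]

theorem pv_values_insert_c (g : PySem.Dict String (PySem.Set String)) {k : String}
    (v : PySem.Set String) (hnd : g.keys.Nodup) (hc : g.contains k = true) :
    (g.insert k v).values = g.values.set (List.idxOf k g.keys) v := by
  show ((g.insert k v).items.map (·.2)) = _
  rw [PySem.Dict.items_insert_of_contains g v hc]
  exact pv_values_set_list g.items k v hnd ((PySem.Dict.contains_iff_mem_keys g k).mp hc)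

theorem pv_getD_idx : ∀ (l : List (String × PySem.Set String)) (k : String)
    (dflt : PySem.Set String), (l.map (·.1)).Nodup → k ∈ l.map (·.1) →
    (PySem.Dict.mk l).getD k dflt = (l.map (·.2)).getD (List.idxOf k (l.map (·.1))) dflt := by
  intro l
  induction l with
  | nil => intro k dflt _ hm; simp at hm
  | cons p rest ih =>
    intro k dflt hnd hm
    rw [List.map_cons] at hm hnd
    rw [PySem.Dict.getD_eq_get?_getD]
    obtain ⟨p1, p2⟩ := p
    rw [PySem.Dict.get?_mk_cons]
    by_cases hp : p1 = k
    · have hb : (p1 == k) = true := by simpa using hp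
      rw [if_pos hb, ← hp]
      simp [List.idxOf_cons_self]
    · rw [if_neg (by simpa using hp)]
      have hm' : k ∈ rest.map (·.1) := by
        rcases List.mem_cons.mp hm with h | h
        · exact absurd h.symm hp
        · exact h
      simp only [List.map_cons]
      rw [List.idxOf_cons_ne _ hp, Nat.succ_eq_add_one, List.getD_cons_succ,
        ← PySem.Dict.getD_eq_get?_getD,
        ih k dflt (List.nodup_cons.mp hnd).2 hm']

theorem pv_getD_idx_d (g : PySem.Dict String (PySem.Set String)) {k : String}
    (dflt : PySem.Set String) (hnd : g.keys.Nodup) (hc : g.contains k = true) :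
    g.getD k dflt = g.values.getD (List.idxOf k g.keys) dflt :=
  pv_getD_idx g.items k dflt hnd ((PySem.Dict.contains_iff_mem_keys g k).mp hc)

theorem pv_keys_len_values (g : PySem.Dict String (PySem.Set String)) :
    g.keys.length = g.values.length := by
  show (g.items.map (·.1)).length = (g.items.map (·.2)).length
  simp

theorem pv_ker : ∀ (l : List String) (k1 k2 : String → String)
    (g1 g2 : PySem.Dict String (PySem.Set String)),
    g1.keys.Nodup → g2.keys.Nodup → g1.values = g2.values →
    (∀ c ∈ l, List.idxOf (k1 c) g1.keys = List.idxOf (k2 c) g2.keys) →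
    (∀ c ∈ l, ∀ c' ∈ l, (k1 c = k1 c' ↔ k2 c = k2 c')) →
    (l.foldl (fun g c => g.insert (k1 c) (PySem.Set.add (g.getD (k1 c) PySem.Set.empty) c)) g1).values
      = (l.foldl (fun g c => g.insert (k2 c) (PySem.Set.add (g.getD (k2 c) PySem.Set.empty) c)) g2).values := by
  intro l
  induction l with
  | nil => intro k1 k2 g1 g2 _ _ hv _ _; exact hv
  | cons c l ih =>
    intro k1 k2 g1 g2 hnd1 hnd2 hv hidx hker
    have hlen : g1.keys.length = g2.keys.length := by
      rw [pv_keys_len_values, pv_keys_len_values, hv]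
    rw [List.foldl_cons, List.foldl_cons]
    by_cases hc1 : g1.contains (k1 c) = true
    · have hmem1 : k1 c ∈ g1.keys := (PySem.Dict.contains_iff_mem_keys g1 (k1 c)).mp hc1
      have hlt : List.idxOf (k1 c) g1.keys < g1.keys.length :=
        List.idxOf_lt_length_iff.mpr hmem1
      have hmem2 : k2 c ∈ g2.keys := by
        rw [← List.idxOf_lt_length_iff, ← hidx c List.mem_cons_self, ← hlen]
        exact hlt
      have hc2 : g2.contains (k2 c) = true :=
        (PySem.Dict.contains_iff_mem_keys g2 (k2 c)).mpr hmem2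
      have hgd : g1.getD (k1 c) PySem.Set.empty = g2.getD (k2 c) PySem.Set.empty := by
        rw [pv_getD_idx_d g1 _ hnd1 hc1, pv_getD_idx_d g2 _ hnd2 hc2, hv,
          hidx c List.mem_cons_self]
      apply ih
      · rw [pv_keys_insert_c _ _ hc1]; exact hnd1
      · rw [pv_keys_insert_c _ _ hc2]; exact hnd2
      · rw [pv_values_insert_c _ _ hnd1 hc1, pv_values_insert_c _ _ hnd2 hc2, hv, hgd,
          hidx c List.mem_cons_self]
      · intro c' hc'
        rw [pv_keys_insert_c _ _ hc1, pv_keys_insert_c _ _ hc2]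
        exact hidx c' (List.mem_cons_of_mem _ hc')
      · intro c' hc' c'' hc''
        exact hker c' (List.mem_cons_of_mem _ hc') c'' (List.mem_cons_of_mem _ hc'')
    · have hmem1 : k1 c ∉ g1.keys := fun hm =>
        hc1 ((PySem.Dict.contains_iff_mem_keys g1 (k1 c)).mpr hm)
      have hmem2 : k2 c ∉ g2.keys := by
        intro hm
        have := List.idxOf_lt_length_iff.mpr hm
        rw [← hidx c List.mem_cons_self, ← hlen] at this
        exact absurd (List.idxOf_lt_length_iff.mp this) hmem1
      have hc2 : g2.contains (k2 c) ≠ true := fun hck =>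
        hmem2 ((PySem.Dict.contains_iff_mem_keys g2 (k2 c)).mp hck)
      have hgd1 : g1.getD (k1 c) PySem.Set.empty = PySem.Set.empty :=
        PySem.Dict.getD_of_not_contains g1 _ (by simpa using hc1)
      have hgd2 : g2.getD (k2 c) PySem.Set.empty = PySem.Set.empty :=
        PySem.Dict.getD_of_not_contains g2 _ (by simpa using hc2)
      have hk1 : (g1.insert (k1 c) (PySem.Set.add (g1.getD (k1 c) PySem.Set.empty) c)).keys
          = g1.keys ++ [k1 c] := by
        have := PySem.Dict.items_insert_of_not_contains g1
          (PySem.Set.add (g1.getD (k1 c) PySem.Set.empty) c) (by simpa using hc1)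
        show (_ : PySem.Dict String (PySem.Set String)).items.map (·.1) = _
        rw [this]; simp only [List.map_append, List.map_cons, List.map_nil]; rfl
      have hk2 : (g2.insert (k2 c) (PySem.Set.add (g2.getD (k2 c) PySem.Set.empty) c)).keys
          = g2.keys ++ [k2 c] := by
        have := PySem.Dict.items_insert_of_not_contains g2
          (PySem.Set.add (g2.getD (k2 c) PySem.Set.empty) c) (by simpa using hc2)
        show (_ : PySem.Dict String (PySem.Set String)).items.map (·.1) = _
        rw [this]; simp only [List.map_append, List.map_cons, List.map_nil]; rfl
      have hv1 : (g1.insert (k1 c) (PySem.Set.add (g1.getD (k1 c) PySem.Set.empty) c)).values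
          = g1.values ++ [PySem.Set.add PySem.Set.empty c] := by
        have := PySem.Dict.items_insert_of_not_contains g1
          (PySem.Set.add (g1.getD (k1 c) PySem.Set.empty) c) (by simpa using hc1)
        show (_ : PySem.Dict String (PySem.Set String)).items.map (·.2) = _
        rw [this]; simp only [List.map_append, List.map_cons, List.map_nil, hgd1]; rfl
      have hv2 : (g2.insert (k2 c) (PySem.Set.add (g2.getD (k2 c) PySem.Set.empty) c)).values
          = g2.values ++ [PySem.Set.add PySem.Set.empty c] := by
        have := PySem.Dict.items_insert_of_not_contains g2
          (PySem.Set.add (g2.getD (k2 c) PySem.Set.empty) c) (by simpa using hc2)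
        show (_ : PySem.Dict String (PySem.Set String)).items.map (·.2) = _
        rw [this]; simp only [List.map_append, List.map_cons, List.map_nil, hgd2]; rfl
      apply ih
      · exact PySem.Dict.nodup_keys_insert _ _ _ hnd1
      · exact PySem.Dict.nodup_keys_insert _ _ _ hnd2
      · rw [hv1, hv2, hv]
      · intro c' hc'
        rw [hk1, hk2, List.idxOf_append, List.idxOf_append]
        by_cases hin1 : k1 c' ∈ g1.keys
        · have hlt' : List.idxOf (k1 c') g1.keys < g1.keys.length :=
            List.idxOf_lt_length_iff.mpr hin1
          have hin2 : k2 c' ∈ g2.keys := by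
            rw [← List.idxOf_lt_length_iff, ← hidx c' (List.mem_cons_of_mem _ hc'), ← hlen]
            exact hlt'
          rw [if_pos hin1, if_pos hin2]
          exact hidx c' (List.mem_cons_of_mem _ hc')
        · have hin2 : k2 c' ∉ g2.keys := by
            intro hm
            have := List.idxOf_lt_length_iff.mpr hm
            rw [← hidx c' (List.mem_cons_of_mem _ hc'), ← hlen] at this
            exact absurd (List.idxOf_lt_length_iff.mp this) hin1
          rw [if_neg hin1, if_neg hin2, hlen]
          by_cases heq : k1 c' = k1 c
          · have heq2 : k2 c' = k2 c :=
              (hker c' (List.mem_cons_of_mem _ hc') c List.mem_cons_self).mp heq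
            rw [heq, heq2, List.idxOf_cons_self, List.idxOf_cons_self]
          · have heq2 : k2 c' ≠ k2 c := fun h2 =>
              heq ((hker c' (List.mem_cons_of_mem _ hc') c List.mem_cons_self).mpr h2)
            rw [List.idxOf_cons_ne _ (fun h => heq h.symm),
              List.idxOf_cons_ne _ (fun h => heq2 h.symm), List.idxOf_nil, List.idxOf_nil]
      · intro c' hc' c'' hc''
        exact hker c' (List.mem_cons_of_mem _ hc') c'' (List.mem_cons_of_mem _ hc'')

-- ===== VERDICT (by name: the statement is the Claim_ definition above) =====
theorem build_co_teach_groups_spec : Claim_equal_build_co_teach_groups := by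
  intro cids edges maxg _hdom
  show build_co_teach_groups cids edges maxg = build_co_teach_groups_alt cids edges maxg
  obtain ⟨hInvE, hcontE⟩ := pv_fold_edges maxg edges
    (cids.foldl (fun d c => d.insert c c) PySem.Dict.empty)
    (cids.foldl (fun d c => d.insert c (1 : Int)) PySem.Dict.empty)
    (cids.foldl (fun st c => if st.1.contains c then st
      else (st.1.insert c c, st.2.insert c [c])) (PySem.Dict.empty, PySem.Dict.empty)).1
    (cids.foldl (fun st c => if st.1.contains c then st
      else (st.1.insert c c, st.2.insert c [c])) (PySem.Dict.empty, PySem.Dict.empty)).2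
    (pv_init cids)
  set dE := (edges.foldl (fun st e =>
      if st.1.contains e.1 && st.1.contains e.2 then pvUnion st.1 st.2 e.1 e.2 maxg
      else st) (cids.foldl (fun d c => d.insert c c) PySem.Dict.empty,
        cids.foldl (fun d c => d.insert c (1 : Int)) PySem.Dict.empty)).1 with hdE
  set gofE := (edges.foldl (fun st e =>
      match st.1.get? e.1, st.1.get? e.2 with
      | some ga, some gb =>
        if ga = gb then st
        else
          let ma := st.2.getD ga []
          let mb := st.2.getD gb []
          if (ma.length : Int) + (mb.length : Int) > maxg then st
          else
            let q := if ma.length < mb.length then (gb, ga, mb, ma) else (ga, gb, ma, mb)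
            (pvRelabel st.1 q.2.2.2 q.1, (st.2.insert q.1 (q.2.2.1 ++ q.2.2.2)).erase q.2.1)
      | _, _ => st)
      ((cids.foldl (fun st c => if st.1.contains c then st
        else (st.1.insert c c, st.2.insert c [c])) (PySem.Dict.empty, PySem.Dict.empty)).1,
       (cids.foldl (fun st c => if st.1.contains c then st
        else (st.1.insert c c, st.2.insert c [c])) (PySem.Dict.empty, PySem.Dict.empty)).2)).1
    with hgofE
  have hwfE : pvWF dE := hInvE.1
  have hPc : ∀ c ∈ cids, dE.contains c = true := by
    intro c hc
    rw [hcontE c, PySem.Dict.contains_eq_isSome_get?, pv_get_foldl_self cids PySem.Dict.empty c]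
    simp [hc]
  have hker : ∀ c ∈ cids, ∀ c' ∈ cids,
      ((fun y => pvRoot dE y) c = (fun y => pvRoot dE y) c' ↔
        (fun y => gofE.getD y y) c = (fun y => gofE.getD y y) c') := by
    intro c hc c' hc'
    exact hInvE.2.2.1 c c' (hPc c hc) (hPc c' hc')
  show ((cids.foldl (fun (st : PySem.Dict String (PySem.Set String) × PySem.Dict String String) c =>
      let r := pvFind st.2.size st.2 c
      (st.1.insert r.1 (PySem.Set.add (st.1.getD r.1 PySem.Set.empty) c), r.2))
      (PySem.Dict.empty, dE)).1).values
    = build_co_teach_groups_alt cids edges maxg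
  rw [pv_fold_final_A (fun y => pvRoot dE y) cids PySem.Dict.empty dE hwfE (fun _ => rfl)]
  rw [pv_ker cids (fun y => pvRoot dE y) (fun y => gofE.getD y y)
    PySem.Dict.empty PySem.Dict.empty PySem.Dict.nodup_keys_empty PySem.Dict.nodup_keys_empty
    rfl (fun c _ => rfl) hker]
  rfl
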